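/- GENERATED by farm/mkstatement.py from design/units.tsv (unit `DGifSlurp.P`) and the assertions of Gif/Spec/Seg_DGifSlurp.lean — do not edit.
   THE STATEMENT of the proof unit `DGifSlurp.P`: segment P of `DGifSlurp` (16 instructions; entries 0x10a680;
   exits 0x10a6d3; ranges 0x10a680-0x10a6d3)
   takes each of its entry assertions to one of its exit assertions (`Gif.Spec.DGifSlurp.SegP`), given the contracts of its callees.
   What the names mean: ProgX/Base/Spec/Basic.lean (the shared hypotheses), Gif/Spec/Seg_DGifSlurp.lean (the assertions). The theorem to prove:
   `theorem DGifSlurp_P_ok : Gif.Spec.DGifSlurp_P.Statement`. -/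
import Gif.Code
import Gif.Dec.All
import Gif.Labels
import Gif.Spec.Seg_DGifSlurp
namespace Gif.Spec.DGifSlurp_P
open X86 X86.User Asan

/-- The statement of unit `DGifSlurp.P`. -/
def Statement : Prop :=
  ∀ (Lay : Layout) (_hLay : Lay.hi = 0x1000000) (μ : Microarch) (_hμ : UserX.MicroOK μ) (u₀ : State)
    (_hcode : HasCodeNat Lay u₀ Gif.L.DGifSlurp.entry Gif.Code.code_DGifSlurp.nat Gif.L.DGifSlurp.size),
    Gif.Spec.DGifSlurp.SegP Lay μ u₀

end Gif.Spec.DGifSlurp_P
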